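-- pv_equiv track=rewrite | github.com/giangnbezg/m1-dashboard-v2 | generate_data.py | fill_down
-- ===== SOURCE A (Python) =====
-- def fill_down(rows, key_fields):
--     last = {}
--     result = []
--     for row in rows:
--         filled = dict(row)
--         for k in key_fields:
--             if filled.get(k, '') == '':
--                 filled[k] = last.get(k, '')
--             else:
--                 last[k] = filled[k]
--         result.append(filled)
--     return result
-- ===== SOURCE B (Python) =====
-- def fill_down(rows, key_fields):
--     # Column-major forward fill: copy all rows, then one carried value per key field.
--     result = [dict(row) for row in rows]
--     for k in key_fields:
--         last = ''
--         for filled in result: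
--             if filled.get(k, '') == '':
--                 filled[k] = last
--             else:
--                 last = filled[k]
--     return result
-- ===== Notes on version B (the rewrite author's own statement) =====
-- stated objective: alternative
-- what changed: Replaces A's row-major pass (one shared dict of last-seen values, all key fields processed per row) by a column-major forward fill: copy the rows once, then one independent scan per key field carrying a single string accumulator.
import Mathlib
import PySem

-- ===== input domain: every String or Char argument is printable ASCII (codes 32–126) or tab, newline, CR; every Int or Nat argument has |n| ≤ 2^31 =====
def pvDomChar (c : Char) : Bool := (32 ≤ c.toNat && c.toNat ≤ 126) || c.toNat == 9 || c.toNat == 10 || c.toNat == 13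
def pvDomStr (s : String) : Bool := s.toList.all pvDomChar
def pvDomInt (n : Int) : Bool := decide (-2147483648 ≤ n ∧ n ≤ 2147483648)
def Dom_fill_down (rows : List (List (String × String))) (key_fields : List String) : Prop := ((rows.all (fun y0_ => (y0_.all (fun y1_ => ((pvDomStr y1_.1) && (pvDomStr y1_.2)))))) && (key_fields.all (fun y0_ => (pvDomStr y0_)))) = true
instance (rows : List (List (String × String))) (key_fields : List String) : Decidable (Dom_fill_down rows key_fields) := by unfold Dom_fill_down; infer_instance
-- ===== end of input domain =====

-- B replaces A's row-major pass (shared dict of last values) by an independent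
-- column-major forward fill per key field; same output, same asymptotic cost.

-- ===== PORT A =====
-- one inner-loop step of A: state is (filled, last)
def fdStep (q : PySem.Dict String String × PySem.Dict String String) (k : String) :
    PySem.Dict String String × PySem.Dict String String :=
  if q.1.getD k "" = "" then (q.1.insert k (q.2.getD k ""), q.2)
  else (q.1, q.2.insert k (q.1.getD k ""))

def fill_down (rows : List (List (String × String))) (key_fields : List String) :
    List (List (String × String)) :=
  -- last = {}; result = []; for row in rows: filled = dict(row); for k in key_fields: …; result.append(filled)
  let st := rows.foldl
    (fun (st : PySem.Dict String String × List (PySem.Dict String String)) row =>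
      let p := key_fields.foldl fdStep (PySem.Dict.ofList row, st.1)
      (p.2, st.2 ++ [p.1]))
    (PySem.Dict.empty, [])
  st.2.map (fun d => d.items)

-- ===== PORT B =====
-- one column pass: walk the rows carrying a single last value for key k
def colScan (k : String) (lastv : String) :
    List (PySem.Dict String String) → List (PySem.Dict String String)
  | [] => []
  | r :: rs =>
    if r.getD k "" = "" then r.insert k lastv :: colScan k lastv rs
    else r :: colScan k (r.getD k "") rs

def fill_down_alt (rows : List (List (String × String))) (key_fields : List String) :
    List (List (String × String)) :=
  -- result = [dict(row) for row in rows]; for k in key_fields: last = ''; <column scan>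
  let result := rows.map (fun row => PySem.Dict.ofList row)
  (key_fields.foldl (fun res k => colScan k "" res) result).map (fun d => d.items)

-- ===== PRECONDITION & SPEC =====
def Spec_fill_down (rows : List (List (String × String))) (key_fields : List String) (out : List (List (String × String))) : Prop := out = fill_down_alt rows key_fields
instance (rows : List (List (String × String))) (key_fields : List String) (out : List (List (String × String))) : Decidable (Spec_fill_down rows key_fields out) := by unfold Spec_fill_down; infer_instance

-- ===== CLAIM (what is proved, stated in full; the proofs are below) =====
def Claim_equal_fill_down : Prop := ∀ (rows : List (List (String × String))) (key_fields : List String), Dom_fill_down rows key_fields → Spec_fill_down rows key_fields (fill_down rows key_fields)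

-- ===== LEMMAS AND PROOFS =====

-- A's outer loop as structural recursion over the row dicts
def loopA (kf : List String) (last : PySem.Dict String String) :
    List (PySem.Dict String String) → List (PySem.Dict String String)
  | [] => []
  | r :: rs =>
    (kf.foldl fdStep (r, last)).1 :: loopA kf (kf.foldl fdStep (r, last)).2 rs

-- bridge: A's foldl-with-append accumulator is loopA
theorem fd_bridge (kf : List String) (rows : List (List (String × String)))
    (last : PySem.Dict String String) (acc : List (PySem.Dict String String)) :
    (rows.foldl
      (fun (st : PySem.Dict String String × List (PySem.Dict String String)) row =>
        let p := kf.foldl fdStep (PySem.Dict.ofList row, st.1)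
        (p.2, st.2 ++ [p.1]))
      (last, acc)).2 = acc ++ loopA kf last (rows.map PySem.Dict.ofList) := by
  induction rows generalizing last acc with
  | nil => simp [loopA]
  | cons r rs ih => simp [loopA, ih, List.append_assoc]

-- the inner fold preserves a key entry shared by filled and last
theorem fdFold_inv (k : String) (ks : List String)
    (f l : PySem.Dict String String) (h : f.getD k "" = l.getD k "") :
    (ks.foldl fdStep (f, l)).1.getD k "" = f.getD k "" ∧
    (ks.foldl fdStep (f, l)).2.getD k "" = f.getD k "" := by
  induction ks generalizing f l with
  | nil => simp [h]
  | cons k₀ ks ih =>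
    simp only [List.foldl_cons, fdStep]
    by_cases he : f.getD k₀ "" = ""
    · simp only [if_pos he]
      have hf' : (f.insert k₀ (l.getD k₀ "")).getD k "" = f.getD k "" := by
        by_cases hk : k = k₀
        · subst hk; rw [PySem.Dict.getD_insert_self, ← h]
        · rw [PySem.Dict.getD_insert_of_ne _ _ _ hk]
      have := ih (f.insert k₀ (l.getD k₀ "")) l (hf'.trans h)
      rw [hf'] at this
      exact this
    · simp only [if_neg he]
      refine ih f (l.insert k₀ (f.getD k₀ "")) ?_
      by_cases hk : k = k₀
      · subst hk; rw [PySem.Dict.getD_insert_self]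
      · rw [PySem.Dict.getD_insert_of_ne _ _ _ hk, h]

-- the inner fold only reads `last` at a key where `filled` is empty
theorem fdFold_congr (ks : List String) (f l₁ l₂ : PySem.Dict String String)
    (h : ∀ k ∈ ks, l₁.getD k "" = l₂.getD k "" ∨ f.getD k "" ≠ "") :
    (ks.foldl fdStep (f, l₁)).1 = (ks.foldl fdStep (f, l₂)).1 ∧
    ∀ k, (l₁.getD k "" = l₂.getD k "" ∨ k ∈ ks) →
      (ks.foldl fdStep (f, l₁)).2.getD k "" = (ks.foldl fdStep (f, l₂)).2.getD k "" := by
  induction ks generalizing f l₁ l₂ with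
  | nil =>
    refine ⟨rfl, fun k hk => ?_⟩
    rcases hk with hk | hk
    · exact hk
    · simp at hk
  | cons k₀ ks ih =>
    simp only [List.foldl_cons, fdStep]
    by_cases he : f.getD k₀ "" = ""
    · have hag : l₁.getD k₀ "" = l₂.getD k₀ "" := by
        rcases h k₀ (List.mem_cons_self) with h' | h'
        · exact h'
        · exact absurd he h'
      simp only [if_pos he]
      rw [hag]
      obtain ⟨h1, h2⟩ := ih (f.insert k₀ (l₂.getD k₀ "")) l₁ l₂ (by
        intro k hk
        rcases h k (List.mem_cons_of_mem _ hk) with h' | h'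
        · exact Or.inl h'
        · by_cases hkk : k = k₀
          · exact absurd (hkk ▸ he) h'
          · exact Or.inr (by rw [PySem.Dict.getD_insert_of_ne _ _ _ hkk]; exact h'))
      refine ⟨h1, fun k hk => ?_⟩
      apply h2
      rcases hk with hk | hk
      · exact Or.inl hk
      · rcases List.mem_cons.mp hk with hk | hk
        · exact Or.inl (hk ▸ hag)
        · exact Or.inr hk
    · simp only [if_neg he]
      obtain ⟨h1, h2⟩ := ih f (l₁.insert k₀ (f.getD k₀ "")) (l₂.insert k₀ (f.getD k₀ "")) (by
        intro k hk
        by_cases hkk : k = k₀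
        · subst hkk; exact Or.inl (by rw [PySem.Dict.getD_insert_self, PySem.Dict.getD_insert_self])
        · rcases h k (List.mem_cons_of_mem _ hk) with h' | h'
          · exact Or.inl (by
              rw [PySem.Dict.getD_insert_of_ne _ _ _ hkk, PySem.Dict.getD_insert_of_ne _ _ _ hkk]
              exact h')
          · exact Or.inr h')
      refine ⟨h1, fun k hk => ?_⟩
      apply h2
      by_cases hkk : k = k₀
      · subst hkk
        exact Or.inl (by rw [PySem.Dict.getD_insert_self, PySem.Dict.getD_insert_self])
      · rcases hk with hk | hk
        · exact Or.inl (by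
            rw [PySem.Dict.getD_insert_of_ne _ _ _ hkk, PySem.Dict.getD_insert_of_ne _ _ _ hkk]
            exact hk)
        · rcases List.mem_cons.mp hk with hk | hk
          · exact absurd hk hkk
          · exact Or.inr hk

theorem loopA_congr (kf : List String) (rs : List (PySem.Dict String String))
    (l₁ l₂ : PySem.Dict String String)
    (h : ∀ k ∈ kf, l₁.getD k "" = l₂.getD k "") :
    loopA kf l₁ rs = loopA kf l₂ rs := by
  induction rs generalizing l₁ l₂ with
  | nil => rfl
  | cons r rs ih =>
    obtain ⟨h1, h2⟩ := fdFold_congr kf r l₁ l₂ (fun k hk => Or.inl (h k hk))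
    simp only [loopA]
    rw [h1, ih _ _ (fun k hk => h2 k (Or.inr hk))]

theorem loopA_nil (rs : List (PySem.Dict String String)) (last : PySem.Dict String String) :
    loopA [] last rs = rs := by
  induction rs with
  | nil => rfl
  | cons r rs ih => simp [loopA, ih]

-- peeling the first key field out of the row-major loop is one column scan
theorem loopA_peel (k : String) (ks : List String)
    (rows : List (PySem.Dict String String)) (last : PySem.Dict String String) :
    loopA (k :: ks) last rows = loopA ks last (colScan k (last.getD k "") rows) := by
  induction rows generalizing last with
  | nil => rfl
  | cons r rs ih =>
    by_cases he : r.getD k "" = ""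
    · simp only [loopA, colScan, if_pos he, List.foldl_cons, fdStep]
      have hinv := fdFold_inv k ks (r.insert k (last.getD k "")) last
        (by rw [PySem.Dict.getD_insert_self])
      rw [PySem.Dict.getD_insert_self] at hinv
      rw [ih, hinv.2]
    · simp only [loopA, colScan, if_neg he, List.foldl_cons, fdStep]
      have hcg := fdFold_congr ks r (last.insert k (r.getD k "")) last (by
        intro k' hk'
        by_cases hkk : k' = k
        · exact Or.inr (hkk ▸ he)
        · exact Or.inl (PySem.Dict.getD_insert_of_ne _ _ _ hkk))
      have hinv := fdFold_inv k ks r (last.insert k (r.getD k ""))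
        (by rw [PySem.Dict.getD_insert_self])
      rw [hcg.1, ih, hinv.2,
        loopA_congr ks _ _ _ (fun k' hk' => hcg.2 k' (Or.inr hk'))]

theorem loopA_eq_cols (kf : List String) (rows : List (PySem.Dict String String)) :
    loopA kf PySem.Dict.empty rows =
      kf.foldl (fun res k => colScan k "" res) rows := by
  induction kf generalizing rows with
  | nil => simp [loopA_nil]
  | cons k ks ih =>
    rw [loopA_peel, PySem.Dict.getD_empty, List.foldl_cons, ih]

-- ===== VERDICT (by name: the statement is the Claim_ definition above) =====
theorem fill_down_spec : Claim_equal_fill_down := by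
  intro rows key_fields _
  unfold Spec_fill_down fill_down fill_down_alt
  simp only [fd_bridge, List.nil_append, loopA_eq_cols]
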